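-- pv_equiv track=rewrite | github.com/AndreasMuehlmann/aspan | main.py | get_point_max_min
-- ===== SOURCE A (Python) =====
-- def get_point_max_min(points):
--     point_max_absorbtion = points[0]
--     point_min_absorbtion = points[0]
--
--     for point in points:
--         if point[1] > point_max_absorbtion[1]:
--             point_max_absorbtion = point
--
--         if point[1] < point_min_absorbtion[1]:
--             point_min_absorbtion = point
--
--     return point_max_absorbtion, point_min_absorbtion
-- ===== SOURCE B (Python) =====
-- def get_point_max_min(points):
--     by_y_asc = sorted(points, key=lambda p: p[1])
--     by_y_desc = sorted(points, key=lambda p: p[1], reverse=True)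
--     return by_y_desc[0], by_y_asc[0]
-- ===== Notes on version B (the rewrite author's own statement) =====
-- stated objective: alternative
-- what changed: Replaces the fused single-pass accumulator scan with two stable sorts by the second coordinate and taking the head of the descending and ascending orders; stability makes the heads the first-encountered extremal points, matching A's strict-comparison first-wins tie-breaking.
import Mathlib
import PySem

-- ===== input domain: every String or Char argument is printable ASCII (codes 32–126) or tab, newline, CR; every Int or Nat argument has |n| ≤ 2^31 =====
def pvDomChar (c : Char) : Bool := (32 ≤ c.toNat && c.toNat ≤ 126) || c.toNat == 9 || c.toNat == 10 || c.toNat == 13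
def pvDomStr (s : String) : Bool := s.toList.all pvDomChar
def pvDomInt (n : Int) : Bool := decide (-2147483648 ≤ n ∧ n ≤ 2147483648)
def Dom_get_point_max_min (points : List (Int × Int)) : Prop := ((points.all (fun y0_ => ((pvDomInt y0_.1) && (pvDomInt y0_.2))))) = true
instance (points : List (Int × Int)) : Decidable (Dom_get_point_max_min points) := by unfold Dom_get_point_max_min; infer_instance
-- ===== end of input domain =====

-- B replaces A's fused single-pass accumulator scan with two stable sorts by the
-- second coordinate, reading the extrema off the heads of the descending/ascending
-- orders (stability preserves A's first-wins tie-breaking); equal on nonempty lists.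


-- ===== PORT A =====
-- points[0] on the empty list raises IndexError; Pre_ excludes [], so the [] branch is unreachable.
def get_point_max_min (points : List (Int × Int)) : (Int × Int) × (Int × Int) :=
  match points with
  | [] => ((0, 0), (0, 0))
  | p0 :: _ =>
    points.foldl
      (fun (st : (Int × Int) × (Int × Int)) point =>
        let st1 := if point.2 > st.1.2 then point else st.1
        let st2 := if point.2 < st.2.2 then point else st.2
        (st1, st2))
      (p0, p0)

-- ===== PORT B =====
-- sorted(points, key=λp. p[1], reverse)[0] ported via PySem.List.sorted and pyGet?;
-- pyGet? is none only on [], excluded by Pre_.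
def get_point_max_min_alt (points : List (Int × Int)) : (Int × Int) × (Int × Int) :=
  let by_y_asc := PySem.List.sorted points (fun p => p.2) false
  let by_y_desc := PySem.List.sorted points (fun p => p.2) true
  ((PySem.List.pyGet? by_y_desc 0).getD ((0, 0)),
   (PySem.List.pyGet? by_y_asc 0).getD ((0, 0)))

-- ===== PRECONDITION & SPEC =====
-- Both A and B raise IndexError on the empty list; Pre_ excludes exactly it.
def Pre_get_point_max_min (points : List (Int × Int)) : Prop := points ≠ []
instance (points : List (Int × Int)) : Decidable (Pre_get_point_max_min points) := by unfold Pre_get_point_max_min; infer_instance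
def pvWitness_get_point_max_min : (List (Int × Int)) := [(1, 2), (3, -4), (5, 2)]

def Spec_get_point_max_min (points : List (Int × Int)) (out : (Int × Int) × (Int × Int)) : Prop := out = get_point_max_min_alt points
instance (points : List (Int × Int)) (out : (Int × Int) × (Int × Int)) : Decidable (Spec_get_point_max_min points out) := by unfold Spec_get_point_max_min; infer_instance

-- ===== CLAIM =====
def Claim_equal_get_point_max_min : Prop := ∀ (points : List (Int × Int)), Dom_get_point_max_min points → Pre_get_point_max_min points → Spec_get_point_max_min points (get_point_max_min points)

-- ===== LEMMAS AND PROOFS =====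

-- The head of an insertion-sort fold seeded with a nonempty list is the first-wins
-- extremum fold of the new elements against the seed's head.
theorem pv_head_foldl_insertBy {α : Type} (before : α → α → Bool) (t : List α) (y : α) (ys : List α) :
    (t.foldl (fun acc x => PySem.List.insertBy before x acc) (y :: ys)).head?
      = some (t.foldl (fun m x => if before x m then x else m) y) := by
  induction t generalizing y ys with
  | nil => rfl
  | cons x t ih =>
    simp only [List.foldl_cons, PySem.List.insertBy]
    by_cases h : before x y
    · simp [h, ih]
    · simp [h, ih]

-- A's fused pair fold splits into two independent first-wins folds.
theorem pv_fold_pair_split (t : List (Int × Int)) (mx mn : Int × Int) :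
    t.foldl
      (fun (st : (Int × Int) × (Int × Int)) point =>
        let st1 := if point.2 > st.1.2 then point else st.1
        let st2 := if point.2 < st.2.2 then point else st.2
        (st1, st2))
      (mx, mn)
    = (t.foldl (fun m x => if x.2 > m.2 then x else m) mx,
       t.foldl (fun m x => if x.2 < m.2 then x else m) mn) := by
  induction t generalizing mx mn with
  | nil => rfl
  | cons p t ih => simp only [List.foldl_cons]; exact ih _ _

-- pyGet? at index 0 is head?.
theorem pv_pyGet?_zero {α : Type} (xs : List α) : PySem.List.pyGet? xs 0 = xs.head? := by
  cases xs <;> simp [PySem.List.pyGet?, PySem.List.pyIdx?]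

-- ===== VERDICT =====
theorem get_point_max_min_spec : Claim_equal_get_point_max_min := by
  intro points _ hpre
  match points with
  | [] => exact absurd rfl hpre
  | p0 :: t =>
    show get_point_max_min (p0 :: t) = get_point_max_min_alt (p0 :: t)
    simp only [get_point_max_min, get_point_max_min_alt,
      PySem.List.sorted_eq_foldl_insertBy, PySem.List.sorted_rev_eq_foldl_insertBy,
      List.foldl_cons, pv_fold_pair_split, pv_pyGet?_zero]
    have hd : PySem.List.insertBy (fun a b : Int × Int => decide (b.2 < a.2)) p0 [] = [p0] := rfl
    have ha : PySem.List.insertBy (fun a b : Int × Int => decide (a.2 < b.2)) p0 [] = [p0] := rfl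
    rw [hd, ha,
      pv_head_foldl_insertBy (fun a b : Int × Int => decide (b.2 < a.2)) t p0 [],
      pv_head_foldl_insertBy (fun a b : Int × Int => decide (a.2 < b.2)) t p0 []]
    simp [gt_iff_lt]
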